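-- pv_equiv track=rewrite | github.com/111LegendaryDude111/Ai-Agent-Code-Practice | apps/bot/src/interview_bot/main.py | _limit_message
-- ===== SOURCE A (Python) =====
-- _TELEGRAM_MESSAGE_TARGET_LENGTH = 3800
--
-- def _truncate_message(value: str, *, max_length: int) -> str:
--     if max_length < 4:
--         return value[:max_length]
--
--     if len(value) <= max_length:
--         return value
--     return f"{value[: max_length - 3]}..."
--
-- def _limit_message(lines: list[str]) -> str:
--     non_empty_lines = [line for line in lines if line.strip() != ""]
--     if len(non_empty_lines) == 0:
--         return ""
--
--     message = "\n".join(non_empty_lines)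
--     if len(message) <= _TELEGRAM_MESSAGE_TARGET_LENGTH:
--         return message
--
--     kept_lines: list[str] = []
--     for line in non_empty_lines:
--         candidate_message = "\n".join([*kept_lines, line])
--         if len(candidate_message) > _TELEGRAM_MESSAGE_TARGET_LENGTH:
--             break
--         kept_lines.append(line)
--
--     if len(kept_lines) == 0:
--         return _truncate_message(message, max_length=_TELEGRAM_MESSAGE_TARGET_LENGTH)
--
--     truncated_message = "\n".join(kept_lines)
--     suffix = "…(сообщение сокращено)"
--     if len(truncated_message) + 1 + len(suffix) <= _TELEGRAM_MESSAGE_TARGET_LENGTH: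
--         return f"{truncated_message}\n{suffix}"
--     return _truncate_message(truncated_message, max_length=_TELEGRAM_MESSAGE_TARGET_LENGTH)
-- ===== SOURCE B (Python) =====
-- _TELEGRAM_MESSAGE_TARGET_LENGTH = 3800
-- _SUFFIX = "…(сообщение сокращено)"
--
--
-- def _limit_message(lines: list[str]) -> str:
--     non_empty_lines = [line for line in lines if line.strip() != ""]
--     message = "\n".join(non_empty_lines)
--     if len(message) <= _TELEGRAM_MESSAGE_TARGET_LENGTH:
--         return message
--
--     # Running prefix length instead of re-joining candidates: the kept prefix
--     # of lines is exactly message[:total], so no kept list is materialised.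
--     total = len(non_empty_lines[0])
--     if total > _TELEGRAM_MESSAGE_TARGET_LENGTH:
--         return message[: _TELEGRAM_MESSAGE_TARGET_LENGTH - 3] + "..."
--     for line in non_empty_lines[1:]:
--         if total + 1 + len(line) > _TELEGRAM_MESSAGE_TARGET_LENGTH:
--             break
--         total += 1 + len(line)
--
--     truncated_message = message[:total]
--     if total + 1 + len(_SUFFIX) <= _TELEGRAM_MESSAGE_TARGET_LENGTH:
--         return truncated_message + "\n" + _SUFFIX
--     return truncated_message
-- ===== Notes on version B (the rewrite author's own statement) =====
-- stated objective: alternative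
-- what changed: Replaces the greedy loop that materialises a kept_lines list and re-joins it for every candidate (plus the final re-join and no-op _truncate_message call) with a single running prefix-length scan, returning the kept part as the slice message[:total].
import Mathlib
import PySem

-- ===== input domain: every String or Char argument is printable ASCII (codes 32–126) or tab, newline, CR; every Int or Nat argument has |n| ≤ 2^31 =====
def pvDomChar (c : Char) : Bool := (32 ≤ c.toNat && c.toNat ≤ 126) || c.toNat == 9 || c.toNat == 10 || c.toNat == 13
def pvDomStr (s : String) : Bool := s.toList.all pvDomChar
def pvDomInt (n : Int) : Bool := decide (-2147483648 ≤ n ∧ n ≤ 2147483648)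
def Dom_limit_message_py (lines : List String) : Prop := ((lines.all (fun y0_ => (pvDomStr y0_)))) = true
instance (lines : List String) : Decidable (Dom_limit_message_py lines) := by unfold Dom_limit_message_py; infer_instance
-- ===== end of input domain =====

-- B replaces A's greedy loop that re-joins the kept lines for every candidate by a single
-- running prefix-length scan, returning the kept part as a slice of the joined message.

def pvSuffix : List Char := "…(сообщение сокращено)".toList

-- ===== PORT A =====
-- _truncate_message (A's helper)
def truncA (v : List Char) (maxLen : Int) : List Char :=
  if maxLen < 4 then PySem.List.slice v none (some maxLen)
  else if (v.length : Int) ≤ maxLen then v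
  else PySem.List.slice v none (some (maxLen - 3)) ++ ['.', '.', '.']

-- A's greedy loop over non_empty_lines (break → return the accumulator)
def aLoop (kept : List (List Char)) : List (List Char) → List (List Char)
  | [] => kept
  | l :: rs =>
    if 3800 < (PySem.Chars.join ['\n'] (kept ++ [l])).length then kept
    else aLoop (kept ++ [l]) rs

def limit_message_py (lines : List String) : String :=
  let ne := (lines.map String.toList).filter (fun l => PySem.Chars.strip l != [])
  if ne.length = 0 then ""
  else
    let message := PySem.Chars.join ['\n'] ne
    if message.length ≤ 3800 then String.ofList message
    else
      let kept := aLoop [] ne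
      if kept.length = 0 then String.ofList (truncA message 3800)
      else
        let tm := PySem.Chars.join ['\n'] kept
        if tm.length + 1 + pvSuffix.length ≤ 3800 then String.ofList (tm ++ '\n' :: pvSuffix)
        else String.ofList (truncA tm 3800)

-- ===== PORT B =====
-- running total = joined length of the kept prefix (break → return total)
def bLoop (total : Nat) : List Nat → Nat
  | [] => total
  | c :: cs => if 3800 < total + 1 + c then total else bLoop (total + 1 + c) cs

def limit_message_py_alt (lines : List String) : String :=
  let ne := (lines.map String.toList).filter (fun l => PySem.Chars.strip l != [])
  let message := PySem.Chars.join ['\n'] ne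
  if message.length ≤ 3800 then String.ofList message
  else
    match ne with
    | [] => ""  -- unreachable: the empty join has length 0 ≤ 3800
    | x :: xs =>
      if 3800 < x.length then String.ofList (message.take (3800 - 3) ++ ['.', '.', '.'])
      else
        let total := bLoop x.length (xs.map List.length)
        let truncated := message.take total
        if total + 1 + pvSuffix.length ≤ 3800 then String.ofList (truncated ++ '\n' :: pvSuffix)
        else String.ofList truncated

-- ===== PRECONDITION & SPEC =====
def Spec_limit_message_py (lines : List String) (out : String) : Prop := out = limit_message_py_alt lines
instance (lines : List String) (out : String) : Decidable (Spec_limit_message_py lines out) := by unfold Spec_limit_message_py; infer_instance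

-- ===== CLAIM (what is proved, stated in full; the proofs are below) =====
def Claim_equal_limit_message_py : Prop := ∀ (lines : List String), Dom_limit_message_py lines → Spec_limit_message_py lines (limit_message_py lines)

-- ===== LEMMAS AND PROOFS =====

theorem pv_join_append (sep : List Char) (pre suf : List (List Char)) (hp : pre ≠ []) (hs : suf ≠ []) :
    PySem.Chars.join sep (pre ++ suf) = PySem.Chars.join sep pre ++ sep ++ PySem.Chars.join sep suf := by
  induction pre with
  | nil => exact absurd rfl hp
  | cons x pre' ih =>
    cases pre' with
    | nil =>
      cases suf with
      | nil => exact absurd rfl hs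
      | cons s ss =>
        rw [List.singleton_append, PySem.Chars.join_cons_cons sep x s ss, PySem.Chars.join_singleton]
    | cons y pre'' =>
      rw [List.cons_append, List.cons_append,
        PySem.Chars.join_cons_cons sep x y (pre'' ++ suf),
        PySem.Chars.join_cons_cons sep x y pre'',
        ← List.cons_append, ih (by simp)]
      simp [List.append_assoc]

theorem pv_join_append_singleton (pre : List (List Char)) (l : List Char) (hp : pre ≠ []) :
    PySem.Chars.join ['\n'] (pre ++ [l]) = PySem.Chars.join ['\n'] pre ++ '\n' :: l := by
  rw [pv_join_append ['\n'] pre [l] hp (by simp), PySem.Chars.join_singleton, List.append_assoc]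
  rfl

theorem pv_bLoop_le (lens : List Nat) (t : Nat) (h : t ≤ 3800) : bLoop t lens ≤ 3800 := by
  induction lens generalizing t with
  | nil => simpa [bLoop] using h
  | cons c cs ih =>
    rw [bLoop]
    split
    · exact h
    · exact ih _ (by omega)

theorem pv_key (rest : List (List Char)) (acc : List (List Char)) (hacc : acc ≠ []) :
    ∃ k, k ≤ rest.length ∧
      aLoop acc rest = acc ++ rest.take k ∧
      (PySem.Chars.join ['\n'] (acc ++ rest.take k)).length
        = bLoop (PySem.Chars.join ['\n'] acc).length (rest.map List.length) := by
  induction rest generalizing acc with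
  | nil => exact ⟨0, by simp [aLoop, bLoop]⟩
  | cons l rs ih =>
    have hlen : (PySem.Chars.join ['\n'] (acc ++ [l])).length
        = (PySem.Chars.join ['\n'] acc).length + 1 + l.length := by
      rw [pv_join_append_singleton acc l hacc]
      simp; omega
    rw [aLoop, List.map_cons, bLoop, hlen]
    split
    · exact ⟨0, by simp⟩
    · obtain ⟨k, hk, he, hb⟩ := ih (acc ++ [l]) (by simp)
      refine ⟨k + 1, by simpa using Nat.succ_le_succ hk, ?_, ?_⟩
      · rw [he, List.take_succ_cons]; simp [List.append_assoc]
      · rw [List.take_succ_cons, List.append_cons acc l (List.take k rs), hb, hlen]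

-- ===== VERDICT (by name: the statement is the Claim_ definition above) =====
theorem limit_message_py_spec : Claim_equal_limit_message_py := by
  intro lines _
  unfold Spec_limit_message_py limit_message_py limit_message_py_alt
  cases hE : (lines.map String.toList).filter (fun l => PySem.Chars.strip l != []) with
  | nil => simp [PySem.Chars.join_nil]
  | cons x xs =>
    simp only [List.length_cons, Nat.succ_ne_zero, if_false]
    by_cases hm : (PySem.Chars.join ['\n'] (x :: xs)).length ≤ 3800
    · simp [hm]
    · simp only [if_neg hm]
      rw [aLoop, List.nil_append, PySem.Chars.join_singleton]
      by_cases hx : 3800 < x.length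
      · simp only [if_pos hx, List.length_nil, truncA,
          show ¬((3800 : Int) < 4) by norm_num,
          show ¬(((PySem.Chars.join ['\n'] (x :: xs)).length : Int) ≤ 3800) by omega,
          if_false, PySem.List.slice_to _ (by norm_num : (0 : Int) ≤ 3800 - 3)]
        rfl
      · simp only [if_neg hx]
        obtain ⟨k, hk, he, hb⟩ := pv_key xs [x] (by simp)
        rw [PySem.Chars.join_singleton] at hb
        have hT : bLoop x.length (xs.map List.length) ≤ 3800 :=
          pv_bLoop_le _ _ (Nat.le_of_not_lt hx)
        have htm : (PySem.Chars.join ['\n'] (x :: xs.take k)).length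
            = bLoop x.length (xs.map List.length) := by simpa using hb
        have hklt : k < xs.length := by
          rcases Nat.lt_or_ge k xs.length with h | h
          · exact h
          · exfalso
            have hkeq : xs.take k = xs := List.take_of_length_le h
            rw [hkeq] at htm
            omega
        have hsplit : PySem.Chars.join ['\n'] (x :: xs)
            = PySem.Chars.join ['\n'] (x :: xs.take k)
              ++ ('\n' :: PySem.Chars.join ['\n'] (xs.drop k)) := by
          conv_lhs => rw [← List.take_append_drop k xs, ← List.cons_append]
          rw [pv_join_append ['\n'] _ _ (by simp)
            (by simp [List.drop_eq_nil_iff]; omega), List.append_assoc]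
          rfl
        have htake : (PySem.Chars.join ['\n'] (x :: xs)).take (bLoop x.length (xs.map List.length))
            = PySem.Chars.join ['\n'] (x :: xs.take k) := by
          rw [hsplit, ← htm, List.take_left]
        rw [he, List.singleton_append, htake]
        simp only [List.length_cons, Nat.succ_ne_zero, if_false, htm]
        by_cases hs : bLoop x.length (xs.map List.length) + 1 + pvSuffix.length ≤ 3800
        · simp [hs]
        · simp only [if_neg hs, truncA,
            show ¬((3800 : Int) < 4) by norm_num, if_false,
            show (((PySem.Chars.join ['\n'] (x :: xs.take k)).length : Int) ≤ 3800) by omega,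
            if_true]
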